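-- pv_equiv track=rewrite | github.com/thechargedneutron/FIction | extras/remove_keys_datasets_parallel.py | sample_data_per_second
-- ===== SOURCE A (Python) =====
-- def sample_data_per_second(data_dict):
--     keys = sorted(data_dict.keys())  # Sort the keys to ensure they are in order
--     samples = []
--
--     # Divide keys into groups of 30
--     for i in range(0, len(keys), 30):
--         group = [key for key in keys if i <= key < i + 30]  # Get the group within 30-frame intervals
--         # assert group, f"No data found in group for frames {i} to {i + 29}"  # Assert that group is not empty
--         if group:
--             min_key = min(group)  # Select the minimum key from the group
--             samples.append(data_dict[min_key])  # Append the corresponding data to the samples list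
--         else:
--             samples.append(None) # cases where no human is present in those frames
--
--     return samples
-- ===== SOURCE B (Python) =====
-- def sample_data_per_second(data_dict):
--     # One forward pointer over the sorted keys instead of re-scanning all keys
--     # for every interval: O(n log n) instead of O(n^2 / 30).
--     keys = sorted(data_dict)
--     out = []
--     j = 0
--     for i in range(0, len(keys), 30):
--         while j < len(keys) and keys[j] < i:
--             j += 1
--         if j < len(keys) and keys[j] < i + 30:
--             out.append(data_dict[keys[j]])
--         else:
--             out.append(None)
--     return out
-- ===== Notes on version B (the rewrite author's own statement) =====
-- stated objective: faster
-- what changed: Replaces the per-interval full scan of all keys (filter + min for every 30-wide interval) by a single forward pointer over the sorted keys: each interval's representative is the first sorted key that is >= the interval start and < its end.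
import Mathlib
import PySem

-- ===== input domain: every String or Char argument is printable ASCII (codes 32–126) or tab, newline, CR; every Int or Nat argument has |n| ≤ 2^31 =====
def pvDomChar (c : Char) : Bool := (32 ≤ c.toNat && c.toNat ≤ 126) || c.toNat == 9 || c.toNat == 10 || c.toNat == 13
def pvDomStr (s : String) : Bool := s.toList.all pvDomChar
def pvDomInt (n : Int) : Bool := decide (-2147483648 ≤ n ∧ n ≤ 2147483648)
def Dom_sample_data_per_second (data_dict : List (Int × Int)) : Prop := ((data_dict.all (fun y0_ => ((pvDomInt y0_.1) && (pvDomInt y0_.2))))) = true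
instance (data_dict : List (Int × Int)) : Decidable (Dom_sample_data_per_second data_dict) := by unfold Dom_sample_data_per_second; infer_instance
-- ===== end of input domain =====

-- B replaces A's per-interval rescan of all keys (filter + min for each 30-wide
-- interval) with one forward pointer over the sorted keys (objective: faster).

-- ===== PORT A =====
def sample_data_per_second (data_dict : List (Int × Int)) : List (Option Int) :=
  let d := PySem.Dict.ofList data_dict
  let keys := PySem.List.sorted d.keys (fun x => x)
  (PySem.List.pyRange 0 (keys.length : Int) 30).foldl
    (fun samples i =>
      let group := keys.filter (fun k => decide (i ≤ k) && decide (k < i + 30))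
      if group ≠ [] then
        samples ++ [(PySem.List.min? group (fun x => x)).bind (fun m => d.get? m)]
      else
        samples ++ [none])
    []

-- ===== PORT B =====
-- the for-loop over range(0, len(keys), 30) carrying the pointer j as the
-- remaining suffix `ks` of the sorted keys; the while loop is dropWhile
def pvAltGo (d : PySem.Dict Int Int) (is : List Int) (ks : List Int) : List (Option Int) :=
  match is with
  | [] => []
  | i :: rest =>
    let ks' := ks.dropWhile (fun k => decide (k < i))
    match ks' with
    | [] => none :: pvAltGo d rest ks'
    | k :: _ => (if k < i + 30 then d.get? k else none) :: pvAltGo d rest ks'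

def sample_data_per_second_alt (data_dict : List (Int × Int)) : List (Option Int) :=
  let d := PySem.Dict.ofList data_dict
  let keys := PySem.List.sorted d.keys (fun x => x)
  pvAltGo d (PySem.List.pyRange 0 (keys.length : Int) 30) keys

-- ===== PRECONDITION & SPEC =====
def Spec_sample_data_per_second (data_dict : List (Int × Int)) (out : List (Option Int)) : Prop := out = sample_data_per_second_alt data_dict
instance (data_dict : List (Int × Int)) (out : List (Option Int)) : Decidable (Spec_sample_data_per_second data_dict out) := by unfold Spec_sample_data_per_second; infer_instance

-- ===== CLAIM (what is proved, stated in full; the proofs are below) =====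
def Claim_equal_sample_data_per_second : Prop := ∀ (data_dict : List (Int × Int)), Dom_sample_data_per_second data_dict → Spec_sample_data_per_second data_dict (sample_data_per_second data_dict)

-- ===== LEMMAS AND PROOFS =====

-- A's loop body appends one element in both branches
lemma pvFoldA (d : PySem.Dict Int Int) (keys : List Int) (is : List Int) (acc : List (Option Int)) :
    is.foldl
      (fun samples i =>
        let group := keys.filter (fun k => decide (i ≤ k) && decide (k < i + 30))
        if group ≠ [] then
          samples ++ [(PySem.List.min? group (fun x => x)).bind (fun m => d.get? m)]
        else
          samples ++ [none]) acc
    = acc ++ is.map (fun i =>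
        let group := keys.filter (fun k => decide (i ≤ k) && decide (k < i + 30))
        if group ≠ [] then (PySem.List.min? group (fun x => x)).bind (fun m => d.get? m)
        else none) := by
  have h : (fun (samples : List (Option Int)) (i : Int) =>
        let group := keys.filter (fun k => decide (i ≤ k) && decide (k < i + 30))
        if group ≠ [] then
          samples ++ [(PySem.List.min? group (fun x => x)).bind (fun m => d.get? m)]
        else
          samples ++ [none])
      = (fun samples i => samples ++
          [let group := keys.filter (fun k => decide (i ≤ k) && decide (k < i + 30))
           if group ≠ [] then (PySem.List.min? group (fun x => x)).bind (fun m => d.get? m)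
           else none]) := by
    funext samples i
    by_cases hg : keys.filter (fun k => decide (i ≤ k) && decide (k < i + 30)) ≠ [] <;>
      simp [hg]
  rw [h, PySem.List.foldl_append_singleton_eq_map]

lemma pvFoldlMinSelf (l : List Int) (x : Int) (h : ∀ y ∈ l, x ≤ y) : l.foldl min x = x := by
  induction l with
  | nil => rfl
  | cons a t ih =>
    simp only [List.foldl_cons]
    have hx : min x a = x := min_eq_left (h a (by simp))
    rw [hx]
    exact ih (fun y hy => h y (by simp [hy]))

-- main invariant: ks is the suffix of keys left of the pointer, everything
-- dropped so far is < every remaining interval start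
lemma pvGoEq (d : PySem.Dict Int Int) (keys : List Int) (hlt : keys.Pairwise (· < ·)) :
    ∀ (is : List Int) (l1 ks : List Int),
      keys = l1 ++ ks →
      (∀ i ∈ is, ∀ x ∈ l1, x < i) →
      is.Pairwise (· ≤ ·) →
      pvAltGo d is ks = is.map (fun i =>
        let group := keys.filter (fun k => decide (i ≤ k) && decide (k < i + 30))
        if group ≠ [] then (PySem.List.min? group (fun x => x)).bind (fun m => d.get? m)
        else none) := by
  intro is
  induction is with
  | nil => intro l1 ks _ _ _; rfl
  | cons i rest ih =>
    intro l1 ks hsplit hdrop hpw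
    have hle : ∀ i' ∈ rest, i ≤ i' := (List.pairwise_cons.mp hpw).1
    have hpw' : rest.Pairwise (· ≤ ·) := (List.pairwise_cons.mp hpw).2
    set ks' := ks.dropWhile (fun k => decide (k < i)) with hks'
    have htd : ks = ks.takeWhile (fun k => decide (k < i)) ++ ks' :=
      (List.takeWhile_append_dropWhile).symm
    have hsplit' : keys = (l1 ++ ks.takeWhile (fun k => decide (k < i))) ++ ks' := by
      rw [List.append_assoc, ← htd]; exact hsplit
    -- everything before ks' in keys is < i
    have hpre : ∀ x ∈ l1 ++ ks.takeWhile (fun k => decide (k < i)), x < i := by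
      intro x hx
      rcases List.mem_append.mp hx with h1 | h2
      · exact hdrop i (by simp) x h1
      · have := List.mem_takeWhile_imp h2
        simpa using this
    -- filter over keys = filter over ks'
    have hfilter : keys.filter (fun k => decide (i ≤ k) && decide (k < i + 30))
        = ks'.filter (fun k => decide (i ≤ k) && decide (k < i + 30)) := by
      rw [hsplit', List.filter_append]
      have : (l1 ++ ks.takeWhile (fun k => decide (k < i))).filter
          (fun k => decide (i ≤ k) && decide (k < i + 30)) = [] := by
        apply List.filter_eq_nil_iff.mpr
        intro x hx
        have := hpre x hx
        simp; omega
      rw [this, List.nil_append]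
    have hdrop' : ∀ i' ∈ rest, ∀ x ∈ l1 ++ ks.takeWhile (fun k => decide (k < i)), x < i' := by
      intro i' hi' x hx
      exact lt_of_lt_of_le (hpre x hx) (hle i' hi')
    have hlt' : ks'.Pairwise (· < ·) := by
      have hsub : ks'.Sublist keys := by
        rw [hsplit']; exact (List.sublist_append_right _ _)
      exact hlt.sublist hsub
    show pvAltGo d (i :: rest) ks = _
    rw [pvAltGo]
    simp only [← hks']
    cases hcase : ks' with
    | nil =>
      have hg : keys.filter (fun k => decide (i ≤ k) && decide (k < i + 30)) = [] := by
        rw [hfilter, hcase]; rfl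
      simp only [List.map_cons, hg]
      rw [ih (l1 ++ ks.takeWhile (fun k => decide (k < i))) [] (hcase ▸ hsplit') hdrop' hpw']
      simp
    | cons k t =>
      have hknl : ¬ (k < i) := by
        have := List.head?_dropWhile_not (fun k => decide (k < i)) ks
        rw [← hks', hcase] at this
        simpa using this
      have hkt : ∀ y ∈ t, k < y := by
        have := List.pairwise_cons.mp (hcase ▸ hlt')
        exact this.1
      show (if k < i + 30 then d.get? k else none) :: pvAltGo d rest (k :: t) = _
      rw [ih (l1 ++ ks.takeWhile (fun k => decide (k < i))) (k :: t) (hcase ▸ hsplit') hdrop' hpw']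
      simp only [List.map_cons]
      congr 1
      by_cases hk30 : k < i + 30
      · -- k is the representative: group = k :: filtered tail, min = k
        have hg : keys.filter (fun k => decide (i ≤ k) && decide (k < i + 30))
            = k :: t.filter (fun k => decide (i ≤ k) && decide (k < i + 30)) := by
          rw [hfilter, hcase, List.filter_cons]
          have : (decide (i ≤ k) && decide (k < i + 30)) = true := by
            simp; omega
          simp [this]
        rw [hg]
        have hmin : PySem.List.min? (k :: t.filter (fun k => decide (i ≤ k) && decide (k < i + 30)))
            (fun x => x) = some k := by
          rw [PySem.List.min?_id_cons]
          congr 1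
          apply pvFoldlMinSelf
          intro y hy
          exact le_of_lt (hkt y (List.mem_of_mem_filter hy))
        simp [hmin, hk30]
      · -- k and everything after it is ≥ i + 30: group empty
        have hg : keys.filter (fun k => decide (i ≤ k) && decide (k < i + 30)) = [] := by
          rw [hfilter, hcase]
          apply List.filter_eq_nil_iff.mpr
          intro x hx
          rcases List.mem_cons.mp hx with h1 | h2
          · subst h1; simp; omega
          · have := hkt x h2; simp; omega
        simp [hg, hk30]

lemma pvRangePairwise (n : Int) : (PySem.List.pyRange 0 n 30).Pairwise (· ≤ ·) := by
  rw [PySem.List.pyRange_of_pos 0 n (by norm_num)]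
  apply List.Pairwise.map
  · intro a b hab
    omega
  · exact (List.pairwise_lt_range).imp (fun {a b} h => by omega)

-- ===== VERDICT (by name: the statement is the Claim_ definition above) =====
theorem sample_data_per_second_spec : Claim_equal_sample_data_per_second := by
  intro data_dict _
  unfold Spec_sample_data_per_second sample_data_per_second sample_data_per_second_alt
  set d := PySem.Dict.ofList data_dict
  set keys := PySem.List.sorted d.keys (fun x => x) with hkeys
  have hnd : keys.Nodup :=
    (PySem.List.sorted_perm d.keys (fun x => x) false).nodup_iff.mpr
      (PySem.Dict.nodup_keys_ofList data_dict)
  have hle : keys.Pairwise (· ≤ ·) := PySem.List.sorted_pairwise d.keys (fun x => x)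
  have hlt : keys.Pairwise (· < ·) :=
    (hle.and hnd).imp (fun {a b} h => lt_of_le_of_ne h.1 h.2)
  rw [pvFoldA, List.nil_append,
    pvGoEq d keys hlt (PySem.List.pyRange 0 (keys.length : Int) 30) [] keys rfl
      (by intro i _ x hx; simp at hx) (pvRangePairwise _)]
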